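-- pv_equiv track=rewrite | github.com/cornpip/algorithm | baekjoon/재귀/순열_조합.py | permutation_g
-- ===== SOURCE A (Python) =====
-- def permutation_g(arr, n, now=-1):
--     for i in range(len(arr)):
--         if i == now:
--             continue
--         if n == 1:
--             yield [arr[i]]
--         else:
--             for j in permutation_g(arr, n-1, i):
--                 yield [arr[i]] + j
-- ===== SOURCE B (Python) =====
-- def permutation_g(arr, n, now=-1):
--     # Iterative level-by-level expansion instead of recursive DFS generator.
--     if n < 1:
--         return
--     states = [([arr[i]], i) for i in range(len(arr)) if i != now]
--     for _ in range(n - 1):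
--         states = [(p + [arr[i]], i)
--                   for (p, last) in states
--                   for i in range(len(arr)) if i != last]
--     for p, _ in states:
--         yield p
-- ===== Notes on version B (the rewrite author's own statement) =====
-- stated objective: alternative
-- what changed: Replaces A's recursive DFS generator by an iterative level-by-level (breadth-first) expansion of (partial sequence, last index) states, materialising each length level with a comprehension; the lexicographic output order is preserved.
import Mathlib
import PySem

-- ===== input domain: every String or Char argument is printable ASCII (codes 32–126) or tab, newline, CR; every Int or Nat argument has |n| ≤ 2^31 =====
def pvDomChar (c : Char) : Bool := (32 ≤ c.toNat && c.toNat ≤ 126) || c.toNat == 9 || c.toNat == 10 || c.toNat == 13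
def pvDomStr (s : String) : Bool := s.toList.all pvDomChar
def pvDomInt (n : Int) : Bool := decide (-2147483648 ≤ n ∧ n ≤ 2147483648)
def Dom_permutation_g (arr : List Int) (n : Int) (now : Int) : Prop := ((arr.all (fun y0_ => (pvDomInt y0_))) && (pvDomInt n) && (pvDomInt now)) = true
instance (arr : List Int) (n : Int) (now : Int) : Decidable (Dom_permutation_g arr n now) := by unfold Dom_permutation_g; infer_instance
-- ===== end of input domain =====

-- B replaces A's recursive DFS generator by an iterative level-by-level expansion of
-- (partial sequence, last index) states; same values in the same (lexicographic) order.

-- ===== PORT A =====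
-- A's recursion decreases n by 1 until n == 1; fuel = n.toNat makes that recursion
-- structural (inside Pre_ the fuel is exactly the recursion depth Python performs;
-- fuel 0, i.e. n ≤ 0, is reachable inside Pre_ only with arr.length ≤ 1, where the
-- Python generator also yields nothing).
def pgA (arr : List Int) : Nat → Int → List (List Int)
  | 0, _ => []
  | Nat.succ f, now =>
      (List.range arr.length).foldl
        (fun acc (i : Nat) =>
          if (i : Int) == now then acc
          else if f == 0 then acc ++ [[arr.getD i 0]]          -- n == 1: yield [arr[i]]
          else acc ++ (pgA arr f (i : Int)).map (fun j => arr.getD i 0 :: j)) []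

def permutation_g (arr : List Int) (n : Int) (now : Int) : List (List Int) :=
  pgA arr n.toNat now

-- ===== PORT B =====
-- one expansion step: states = [(p+[arr[i]], i) for (p,last) in states for i in range(len(arr)) if i != last]
def pgStep (arr : List Int) (states : List (List Int × Int)) : List (List Int × Int) :=
  states.flatMap (fun pl =>
    ((List.range arr.length).filter (fun (i : Nat) => (i : Int) ≠ pl.2)).map
      (fun (i : Nat) => (pl.1 ++ [arr.getD i 0], (i : Int))))

def permutation_g_alt (arr : List Int) (n : Int) (now : Int) : List (List Int) :=
  if n < 1 then []
  else
    let init := ((List.range arr.length).filter (fun (i : Nat) => (i : Int) ≠ now)).map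
        (fun (i : Nat) => ([arr.getD i 0], (i : Int)))
    let final := (List.range (n - 1).toNat).foldl (fun st _ => pgStep arr st) init
    final.map Prod.fst

-- ===== PRECONDITION & SPEC =====
-- Pre_ keeps the natural domain n ≥ 1 plus the trivially returning arrays of length ≤ 1;
-- it excludes exactly the inputs (n ≤ 0 with at least two elements) on which the Python A
-- raises RecursionError when iterated.
def Pre_permutation_g (arr : List Int) (n : Int) (now : Int) : Prop :=
  1 ≤ n ∨ arr.length ≤ 1
instance (arr : List Int) (n : Int) (now : Int) : Decidable (Pre_permutation_g arr n now) := by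
  unfold Pre_permutation_g; infer_instance

def pvWitness_permutation_g : List Int × Int × Int := ([3, 1, 2], 3, -1)

def Spec_permutation_g (arr : List Int) (n : Int) (now : Int) (out : List (List Int)) : Prop := out = permutation_g_alt arr n now
instance (arr : List Int) (n : Int) (now : Int) (out : List (List Int)) : Decidable (Spec_permutation_g arr n now out) := by unfold Spec_permutation_g; infer_instance

-- ===== CLAIM (what is proved, stated in full; the proofs are below) =====
def Claim_equal_permutation_g : Prop := ∀ (arr : List Int) (n : Int) (now : Int), Dom_permutation_g arr n now → Pre_permutation_g arr n now → Spec_permutation_g arr n now (permutation_g arr n now)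

-- ===== LEMMAS AND PROOFS =====

-- proof-side spec: all valid index sequences of a given length, lexicographically
def pgExt (arr : List Int) : Nat → Int → List (List Int)
  | 0, _ => [[]]
  | Nat.succ f, now =>
      (List.range arr.length).flatMap (fun (i : Nat) =>
        if (i : Int) = now then []
        else (pgExt arr f (i : Int)).map (fun j => arr.getD i 0 :: j))

theorem foldl_if_app {α : Type} (P Q : Nat → Bool) (u v : Nat → List α) :
    ∀ (l : List Nat) (acc : List α),
      l.foldl (fun acc i => if P i then acc else if Q i then acc ++ u i else acc ++ v i) acc
        = acc ++ l.flatMap (fun i => if P i then [] else if Q i then u i else v i) := by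
  intro l
  induction l with
  | nil => simp
  | cons x xs ih =>
      intro acc
      by_cases hp : P x
      · simp [List.foldl, hp, ih]
      · by_cases hq : Q x <;> simp [List.foldl, hp, hq, ih, List.append_assoc]

theorem pgA_succ (arr : List Int) (f : Nat) (now : Int) :
    pgA arr (f + 1) now
      = (List.range arr.length).flatMap (fun (i : Nat) =>
          if (i : Int) = now then []
          else if f = 0 then [[arr.getD i 0]]
          else (pgA arr f (i : Int)).map (fun j => arr.getD i 0 :: j)) := by
  simp only [pgA]
  rw [foldl_if_app (fun i => (i : Int) == now) (fun _ => f == 0)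
        (fun i => [[arr.getD i 0]]) (fun i => (pgA arr f (i : Int)).map (fun j => arr.getD i 0 :: j))]
  simp only [List.nil_append]
  congr 1
  funext i
  by_cases h : (i : Int) = now
  · simp [h]
  · by_cases hf : f = 0 <;> simp [h, hf]

theorem pgExt_succ (arr : List Int) (f : Nat) (now : Int) :
    pgExt arr (f + 1) now
      = (List.range arr.length).flatMap (fun (i : Nat) =>
          if (i : Int) = now then []
          else (pgExt arr f (i : Int)).map (fun j => arr.getD i 0 :: j)) := rfl

theorem pgA_eq_ext (arr : List Int) :
    ∀ (f : Nat) (now : Int), pgA arr (f + 1) now = pgExt arr (f + 1) now := by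
  intro f
  induction f with
  | zero =>
      intro now
      rw [pgA_succ, pgExt_succ]
      congr 1
  | succ f ih =>
      intro now
      rw [pgA_succ, pgExt_succ]
      congr 1
      funext i
      by_cases h : (i : Int) = now <;> simp [h, ih]

theorem flatMap_filter {α : Type} (q : Nat → Bool) (g : Nat → List α) :
    ∀ (l : List Nat), (l.filter q).flatMap g = l.flatMap (fun i => if q i then g i else []) := by
  intro l
  induction l with
  | nil => simp
  | cons x xs ih => by_cases h : q x <;> simp [List.filter, h, ih]

-- one level of B's expansion, seen from a fixed prefix p
theorem ext_shift (arr : List Int) (f : Nat) (p : List Int) (now : Int) :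
    (((List.range arr.length).filter (fun (i : Nat) => (i : Int) ≠ now)).map
        (fun (i : Nat) => (p ++ [arr.getD i 0], (i : Int)))).flatMap
        (fun pl => (pgExt arr f pl.2).map (fun t => pl.1 ++ t))
      = (pgExt arr (f + 1) now).map (fun t => p ++ t) := by
  rw [List.flatMap_map, flatMap_filter (fun (i : Nat) => decide ((i : Int) ≠ now)),
      pgExt_succ, List.map_flatMap]
  congr 1
  funext i
  by_cases h : (i : Int) = now <;>
    simp [h, List.map_map, Function.comp_def, List.append_assoc]

theorem step_complete (arr : List Int) :
    ∀ (f : Nat) (S : List (List Int × Int)),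
      ((List.range f).foldl (fun st _ => pgStep arr st) S).map Prod.fst
        = S.flatMap (fun pl => (pgExt arr f pl.2).map (fun t => pl.1 ++ t)) := by
  intro f
  induction f with
  | zero =>
      intro S
      induction S with
      | nil => simp
      | cons a t ihS => simp_all [pgExt]
  | succ f ih =>
      intro S
      rw [List.range_succ_eq_map]
      simp only [List.foldl_cons, List.foldl_map]
      rw [ih (pgStep arr S)]
      simp only [pgStep, List.flatMap_assoc]
      congr 1
      funext pl
      rw [ext_shift]

theorem ext_succ_flat (arr : List Int) (f : Nat) (now : Int) :
    pgExt arr (f + 1) now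
      = (((List.range arr.length).filter (fun (i : Nat) => (i : Int) ≠ now)).map
          (fun (i : Nat) => (([arr.getD i 0] : List Int), (i : Int)))).flatMap
          (fun pl => (pgExt arr f pl.2).map (fun t => pl.1 ++ t)) := by
  rw [List.flatMap_map, flatMap_filter (fun (i : Nat) => decide ((i : Int) ≠ now)),
      pgExt_succ]
  congr 1
  funext i
  by_cases h : (i : Int) = now <;> simp [h]

-- ===== VERDICT (by name: the statement is the Claim_ definition above) =====
theorem permutation_g_spec : Claim_equal_permutation_g := by
  intro arr n now _ hpre
  unfold Spec_permutation_g permutation_g permutation_g_alt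
  by_cases hn : n < 1
  · -- n ≤ 0: inside Pre_ this forces arr.length ≤ 1 and both sides yield nothing
    rw [if_pos hn]
    have h0 : n.toNat = 0 := by omega
    rw [h0]; rfl
  · rw [if_neg hn]
    have hm : n.toNat = (n - 1).toNat + 1 := by omega
    rw [hm, pgA_eq_ext, step_complete, ← ext_succ_flat]
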